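-- pv_equiv track=rewrite | github.com/omervered0708/HW1_2 | data.py | filter_by_feature
-- ===== SOURCE A (Python) =====
-- def filter_by_feature(data, feature, values):
--     """
--
--     :param data: a dictionary whose keys are features from the data set
--     and values are lists with the values of the features
--     :param feature: a name of a categorical feature
--     :param values: a set of values
--     :return: 2 dictionaries: data1 which includes the records where feature received a value in the set values
--     and data2  which includes the records where feature received a value that's not in values
--     """
--     data1 = {}
--     data2 = {}
--     init_dict(data1, data)
--     init_dict(data2, data)
--     for i, value in enumerate(data[feature]):
--         if value in values:
--             copy_to_dict(data, i, data1)
--         else: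
--             copy_to_dict(data, i, data2)
--     return data1, data2
--
-- def init_dict(dict, data):
--     """
--     the function initializes dict with the keys from data and empty lists as values
--     :param dict: a dictionary to initialize
--     :param data: a dictionary with the keys used to initialize dict
--     :return: none
--     """
--     for key in data.keys():
--         dict[key] = []
--
-- def copy_to_dict(data, i, dict):
--     """
--     the function copies the ith value in each list in data to dict
--     :param data: a dictionary to copy from
--     :param i: index in the lists to copy
--     :param dict: a dictionary to copy to
--     :return: none
--     """
--     for key, dict_value in data.items():
--         dict[key].append(dict_value[i])
-- ===== SOURCE B (Python) =====
-- def filter_by_feature(data, feature, values):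
--     mask = [v in values for v in data[feature]]
--     data1 = {k: [col[i] for i, m in enumerate(mask) if m] for k, col in data.items()}
--     data2 = {k: [col[i] for i, m in enumerate(mask) if not m] for k, col in data.items()}
--     return data1, data2
-- ===== Notes on version B (the rewrite author's own statement) =====
-- stated objective: simpler
-- what changed: Precomputes a membership mask once and builds both result dicts column-by-column with comprehensions, swapping the loop nesting (outer keys, inner rows) and eliminating the init_dict/copy_to_dict helpers.
import Mathlib
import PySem

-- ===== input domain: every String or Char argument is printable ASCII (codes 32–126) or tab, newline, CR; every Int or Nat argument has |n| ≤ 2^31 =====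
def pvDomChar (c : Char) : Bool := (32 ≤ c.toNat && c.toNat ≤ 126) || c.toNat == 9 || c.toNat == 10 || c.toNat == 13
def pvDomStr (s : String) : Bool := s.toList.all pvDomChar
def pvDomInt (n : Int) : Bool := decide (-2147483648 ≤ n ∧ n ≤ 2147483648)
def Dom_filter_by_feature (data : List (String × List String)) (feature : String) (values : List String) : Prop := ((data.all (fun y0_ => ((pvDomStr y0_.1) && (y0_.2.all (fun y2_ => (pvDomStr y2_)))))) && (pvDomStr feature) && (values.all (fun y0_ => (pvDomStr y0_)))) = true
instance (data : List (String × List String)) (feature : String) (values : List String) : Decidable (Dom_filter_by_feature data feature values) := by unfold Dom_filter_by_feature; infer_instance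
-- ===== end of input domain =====

-- B rebuilds the two dicts column-by-column from a precomputed membership mask instead of
-- A's row-by-row appends through init_dict/copy_to_dict; same result, simpler structure.

-- shared dict primitive: Python's data[key] on an association list (first match; [] outside Pre_, where Python raises KeyError)
def getCol (data : List (String × List String)) (k : String) : List String :=
  match data with
  | [] => []
  | p :: t => if p.1 = k then p.2 else getCol t k

-- ===== PORT A =====
-- init_dict: every key of data mapped to an empty list
def initDict (data : List (String × List String)) : List (String × List String) :=
  data.map (fun p => (p.1, ([] : List String)))

-- dict[key].append(v) on an association list (first matching key)
def dictAppend (d : List (String × List String)) (k : String) (v : String) : List (String × List String) :=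
  match d with
  | [] => []
  | p :: t => if p.1 = k then (p.1, p.2 ++ [v]) :: t else p :: dictAppend t k v

-- copy_to_dict: for each key of data, append data[key][i] to d[key]
def copyToDict (data : List (String × List String)) (i : Int) (d : List (String × List String)) : List (String × List String) :=
  data.foldl (fun d p => dictAppend d p.1 (PySem.List.pyGetD p.2 i "")) d

def filter_by_feature (data : List (String × List String)) (feature : String) (values : List String) : (List (String × List String)) × (List (String × List String)) :=
  (PySem.List.enumerate (getCol data feature)).foldl
    (fun st q =>
      if q.2 ∈ values then (copyToDict data q.1 st.1, st.2)
      else (st.1, copyToDict data q.1 st.2))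
    (initDict data, initDict data)

-- ===== PORT B =====
-- [col[i] for i, m in enumerate(mask) if m == b]
def selRows (col : List String) (mask : List Bool) (b : Bool) : List String :=
  (PySem.List.enumerate mask).filterMap
    (fun q => if q.2 = b then PySem.List.pyGet? col q.1 else none)

def filter_by_feature_alt (data : List (String × List String)) (feature : String) (values : List String) : (List (String × List String)) × (List (String × List String)) :=
  let mask := (getCol data feature).map (fun v => decide (v ∈ values))
  (data.map (fun p => (p.1, selRows p.2 mask true)),
   data.map (fun p => (p.1, selRows p.2 mask false)))

-- ===== PRECONDITION & SPEC =====
-- Pre_ excludes inputs where the Python raises: feature not a key (KeyError), some column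
-- shorter than data[feature] (IndexError), and duplicate keys (not representable as a Python dict).
def Pre_filter_by_feature (data : List (String × List String)) (feature : String) (values : List String) : Prop :=
  (data.map Prod.fst).Nodup ∧ feature ∈ data.map Prod.fst ∧
    ∀ p ∈ data, ∀ q ∈ data, q.1 = feature → q.2.length ≤ p.2.length
instance (data : List (String × List String)) (feature : String) (values : List String) : Decidable (Pre_filter_by_feature data feature values) := by unfold Pre_filter_by_feature; infer_instance

def pvWitness_filter_by_feature : (List (String × List String)) × String × List String :=
  ([("f", ["a", "b", "c"]), ("g", ["1", "2", "3"])], "f", ["a", "c"])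

def Spec_filter_by_feature (data : List (String × List String)) (feature : String) (values : List String) (out : (List (String × List String)) × (List (String × List String))) : Prop := out = filter_by_feature_alt data feature values
instance (data : List (String × List String)) (feature : String) (values : List String) (out : (List (String × List String)) × (List (String × List String))) : Decidable (Spec_filter_by_feature data feature values out) := by unfold Spec_filter_by_feature; infer_instance

-- ===== CLAIM (what is proved, stated in full; the proofs are below) =====
def Claim_equal_filter_by_feature : Prop := ∀ (data : List (String × List String)) (feature : String) (values : List String), Dom_filter_by_feature data feature values → Pre_filter_by_feature data feature values → Spec_filter_by_feature data feature values (filter_by_feature data feature values)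

-- ===== LEMMAS AND PROOFS =====

theorem getCol_mem (data : List (String × List String)) (feature : String)
    (h : feature ∈ data.map Prod.fst) : (feature, getCol data feature) ∈ data := by
  induction data with
  | nil => simp at h
  | cons p t ih =>
    by_cases hp : p.1 = feature
    · subst hp; simp [getCol]
    · simp only [List.map, List.mem_cons] at h
      rcases h with h | h
      · exact absurd h.symm hp
      · exact List.mem_cons_of_mem p (by simpa [getCol, hp] using ih h)

theorem dictAppend_cons_ne (a : String × List String) (d : List (String × List String)) (k : String) (v : String) (h : a.1 ≠ k) :
    dictAppend (a :: d) k v = a :: dictAppend d k v := by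
  simp [dictAppend, h]

theorem copyToDict_cons (l : List (String × List String)) (i : Int) (a : String × List String) (d : List (String × List String))
    (h : ∀ p ∈ l, p.1 ≠ a.1) :
    copyToDict l i (a :: d) = a :: copyToDict l i d := by
  induction l generalizing d with
  | nil => rfl
  | cons q t ih =>
    have hq : q.1 ≠ a.1 := h q (by simp)
    show copyToDict t i (dictAppend (a :: d) q.1 _) = a :: copyToDict t i (dictAppend d q.1 _)
    rw [dictAppend_cons_ne a d q.1 _ (fun he => hq he.symm)]
    exact ih _ (fun p hp => h p (by simp [hp]))

theorem copyToDict_map (l : List (String × List String)) (i : Int) (g : String × List String → List String)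
    (h : (l.map Prod.fst).Nodup) :
    copyToDict l i (l.map (fun p => (p.1, g p))) =
      l.map (fun p => (p.1, g p ++ [PySem.List.pyGetD p.2 i ""])) := by
  induction l generalizing g with
  | nil => rfl
  | cons q t ih =>
    simp only [List.map, List.nodup_cons] at h ⊢
    show copyToDict t i (dictAppend ((q.1, g q) :: t.map (fun p => (p.1, g p))) q.1 _) = _
    rw [show dictAppend ((q.1, g q) :: t.map (fun p => (p.1, g p))) q.1 (PySem.List.pyGetD q.2 i "")
          = (q.1, g q ++ [PySem.List.pyGetD q.2 i ""]) :: t.map (fun p => (p.1, g p)) by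
        simp [dictAppend]]
    rw [copyToDict_cons t i _ _ (by
      intro p hp he
      exact h.1 (he ▸ List.mem_map_of_mem hp))]
    rw [ih g h.2]

-- the membership-selected values of column col among the indexed pairs ps
def selIdx (values : List String) (ps : List (Int × String)) (col : List String) (b : Bool) : List String :=
  ps.filterMap (fun q => if decide (q.2 ∈ values) = b then some (PySem.List.pyGetD col q.1 "") else none)

theorem loop_eq (data : List (String × List String)) (values : List String)
    (h : (data.map Prod.fst).Nodup) (ps : List (Int × String)) :
    ∀ (g1 g2 : String × List String → List String),
    ps.foldl
      (fun st q =>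
        if q.2 ∈ values then (copyToDict data q.1 st.1, st.2)
        else (st.1, copyToDict data q.1 st.2))
      (data.map (fun p => (p.1, g1 p)), data.map (fun p => (p.1, g2 p)))
    = (data.map (fun p => (p.1, g1 p ++ selIdx values ps p.2 true)),
       data.map (fun p => (p.1, g2 p ++ selIdx values ps p.2 false))) := by
  induction ps with
  | nil => intro g1 g2; simp [selIdx]
  | cons q t ih =>
    intro g1 g2
    by_cases hq : q.2 ∈ values
    · rw [List.foldl_cons]
      simp only [hq, if_pos]
      rw [copyToDict_map data q.1 g1 h]
      rw [ih (fun p => g1 p ++ [PySem.List.pyGetD p.2 q.1 ""]) g2]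
      simp [selIdx, hq, List.append_assoc]
    · rw [List.foldl_cons]
      simp only [hq, if_false]
      rw [copyToDict_map data q.1 g2 h]
      rw [ih g1 (fun p => g2 p ++ [PySem.List.pyGetD p.2 q.1 ""])]
      simp [selIdx, hq, List.append_assoc]

theorem pyGet?_eq_some_pyGetD (xs : List String) (i : Int) (h0 : 0 ≤ i) (h : i < xs.length) :
    PySem.List.pyGet? xs i = some (PySem.List.pyGetD xs i "") := by
  have hn : i.toNat < xs.length := by omega
  simp [PySem.List.pyGet?, PySem.List.pyGetD, PySem.List.pyIdx?, h0, h, hn]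

theorem enumerate_map (f : String → Bool) (xs : List String) (s : Int) :
    PySem.List.enumerate (xs.map f) s = (PySem.List.enumerate xs s).map (fun q => (q.1, f q.2)) := by
  induction xs generalizing s with
  | nil => rfl
  | cons x t ih => simp [PySem.List.enumerate_cons, ih]

theorem mem_enumerate_bounds (q : Int × String) (xs : List String) (s : Int)
    (h : q ∈ PySem.List.enumerate xs s) : s ≤ q.1 ∧ q.1 < s + xs.length := by
  induction xs generalizing s with
  | nil => simp [PySem.List.enumerate] at h
  | cons x t ih =>
    rw [PySem.List.enumerate_cons] at h
    rcases List.mem_cons.mp h with h | h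
    · simp [h]
    · have := ih (s + 1) h
      constructor
      · omega
      · simp only [List.length_cons]; push_cast; omega

theorem selRows_eq_selIdx (values : List String) (fc col : List String) (b : Bool)
    (hlen : fc.length ≤ col.length) :
    selRows col (fc.map (fun v => decide (v ∈ values))) b
      = selIdx values (PySem.List.enumerate fc 0) col b := by
  unfold selRows selIdx
  rw [enumerate_map, List.filterMap_map]
  apply List.filterMap_congr
  intro q hq
  have hb := mem_enumerate_bounds q fc 0 hq
  simp only [Function.comp]
  by_cases hv : decide (q.2 ∈ values) = b
  · rw [if_pos hv, if_pos hv]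
    exact pyGet?_eq_some_pyGetD col q.1 hb.1 (by have := hb.2; push_cast at this ⊢; omega)
  · rw [if_neg hv, if_neg hv]

-- ===== VERDICT (by name: the statement is the Claim_ definition above) =====
theorem filter_by_feature_spec : Claim_equal_filter_by_feature := by
  intro data feature values _ hpre
  obtain ⟨hnd, hmem, hlen'⟩ := hpre
  have hlen : ∀ p ∈ data, (getCol data feature).length ≤ p.2.length :=
    fun p hp => hlen' p hp (feature, getCol data feature) (getCol_mem data feature hmem) rfl
  show filter_by_feature data feature values
      = filter_by_feature_alt data feature values
  have halt : filter_by_feature_alt data feature values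
      = (data.map (fun p => (p.1, selRows p.2 ((getCol data feature).map (fun v => decide (v ∈ values))) true)),
         data.map (fun p => (p.1, selRows p.2 ((getCol data feature).map (fun v => decide (v ∈ values))) false))) := rfl
  rw [halt]
  unfold filter_by_feature initDict
  rw [loop_eq data values hnd (PySem.List.enumerate (getCol data feature)) (fun _ => []) (fun _ => [])]
  simp only [List.nil_append, Prod.mk.injEq]
  refine ⟨?_, ?_⟩ <;>
  · apply List.map_congr_left
    intro p hp
    rw [selRows_eq_selIdx values (getCol data feature) p.2 _ (hlen p hp)]
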